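-- pv_equiv track=rewrite | github.com/alimohebbi/test-reuse-study | test_reuse_evaluator/fidelity_plugin/utils/atm_parser.py | get_test_section
-- ===== SOURCE A (Python) =====
-- def get_test_section(lines):
--     seen_test = False
--     test = []
--     expression = ''
--     for line in lines:
--         if not seen_test and '@Test' in line:
--             seen_test = True
--         elif seen_test:
--             if "private static Matcher<View> childAtPosition(" in line:
--                 break
--             else:
--                 expression += line.strip()
--                 if ';' not in line:
--                     continue
--                 test.append(expression.strip(" ").strip())
--                 expression = ''
--     return test
-- ===== SOURCE B (Python) =====
-- HELPER_SENTINEL = "private static Matcher<View> childAtPosition("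
--
--
-- def get_test_section(lines):
--     # Find the first line containing '@Test'; without it there is no section.
--     start = None
--     for i, line in enumerate(lines):
--         if '@Test' in line:
--             start = i
--             break
--     if start is None:
--         return []
--     # Collect the lines strictly between '@Test' and the helper-method sentinel.
--     section = []
--     for line in lines[start + 1:]:
--         if HELPER_SENTINEL in line:
--             break
--         section.append(line)
--     # Group: buffer stripped lines, flush at each line containing ';'.
--     test = []
--     buf = []
--     for line in section:
--         buf.append(line.strip())
--         if ';' in line:
--             test.append(''.join(buf).strip(' ').strip())
--             buf = []
--     return test
-- ===== Notes on version B (the rewrite author's own statement) =====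
-- stated objective: idiomatic
-- what changed: B replaces A's single stateful scan (seen flag, running string concatenation) by a three-stage decomposition: locate the '@Test' boundary, slice out the section up to the helper-method sentinel, then group the slice with a list buffer joined once per ';'-flush.
import Mathlib
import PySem

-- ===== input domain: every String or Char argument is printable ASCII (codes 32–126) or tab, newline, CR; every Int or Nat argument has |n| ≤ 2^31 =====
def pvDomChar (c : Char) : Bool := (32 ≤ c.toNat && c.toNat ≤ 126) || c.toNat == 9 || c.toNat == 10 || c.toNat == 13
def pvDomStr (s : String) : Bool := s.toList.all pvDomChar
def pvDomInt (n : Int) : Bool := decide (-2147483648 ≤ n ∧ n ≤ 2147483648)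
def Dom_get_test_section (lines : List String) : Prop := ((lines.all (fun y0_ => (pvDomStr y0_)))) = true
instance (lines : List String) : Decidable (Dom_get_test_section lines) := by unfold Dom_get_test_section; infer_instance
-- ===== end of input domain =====

-- B replaces A's single flag-driven scan by boundary finding + slice + buffered grouping (idiomatic decomposition, same cost).

-- ===== PORT A =====
def pvSent : String := "private static Matcher<View> childAtPosition("

-- A's single loop: state (seen_test, test, expression); 'break' returns test.
def pvLoopA : List String → Bool → List String → String → List String
  | [], _, test, _ => test
  | l :: ls, seen, test, expr =>
    if !seen && PySem.Str.isIn "@Test" l then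
      pvLoopA ls true test expr
    else if seen then
      if PySem.Str.isIn pvSent l then test
      else
        let expr2 := expr ++ PySem.Str.strip l
        if !(PySem.Str.isIn ";" l) then pvLoopA ls seen test expr2
        else pvLoopA ls seen (test ++ [PySem.Str.strip (PySem.Str.stripChars expr2 " ")]) ""
    else pvLoopA ls seen test expr

def get_test_section (lines : List String) : List String :=
  pvLoopA lines false [] ""

-- ===== PORT B =====
-- first loop of Source B: index of the first line containing '@Test'
def pvFindStart : List String → Option Nat
  | [] => none
  | l :: ls => if PySem.Str.isIn "@Test" l then some 0 else (pvFindStart ls).map (· + 1)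

-- second loop of Source B: collect lines up to the sentinel
def pvSection : List String → List String
  | [] => []
  | l :: ls => if PySem.Str.isIn pvSent l then [] else l :: pvSection ls

-- third loop of Source B: buffer stripped lines, flush the joined buffer at each ';'-line
def pvGroup (test buf : List String) : List String → List String
  | [] => test
  | l :: ls =>
    let buf2 := buf ++ [PySem.Str.strip l]
    if PySem.Str.isIn ";" l then
      pvGroup (test ++ [PySem.Str.strip (PySem.Str.stripChars (PySem.Str.join "" buf2) " ")]) [] ls
    else
      pvGroup test buf2 ls

def get_test_section_alt (lines : List String) : List String :=
  match pvFindStart lines with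
  | none => []
  | some k => pvGroup [] [] (pvSection (lines.drop (k + 1)))   -- lines[start+1:] with start+1 ≥ 0 is drop

-- ===== PRECONDITION & SPEC =====
def Spec_get_test_section (lines : List String) (out : List String) : Prop := out = get_test_section_alt lines
instance (lines : List String) (out : List String) : Decidable (Spec_get_test_section lines out) := by unfold Spec_get_test_section; infer_instance

-- ===== CLAIM (what is proved, stated in full; the proofs are below) =====
def Claim_equal_get_test_section : Prop := ∀ (lines : List String), Dom_get_test_section lines → Spec_get_test_section lines (get_test_section lines)

-- ===== LEMMAS AND PROOFS =====
lemma pvJoin_nil : PySem.Str.join "" ([] : List String) = "" := by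
  simp [PySem.Str.join, PySem.Chars.join, List.intercalate]

lemma pvJoin_snoc (buf : List String) (s : String) :
    PySem.Str.join "" (buf ++ [s]) = PySem.Str.join "" buf ++ s := by
  have h : ∀ l : List (List Char), (List.intersperse ([] : List Char) l).flatten = l.flatten := by
    intro l
    induction l with
    | nil => simp
    | cons a t ih => cases t <;> simp_all [List.intersperse]
  simp [PySem.Str.join, PySem.Chars.join, List.intercalate, h]

-- A's seen=true phase equals B's grouping of the collected section,
-- under the invariant expr = ''.join(buf).
lemma pvLoopA_true_eq_group :
    ∀ (ls : List String) (test buf : List String),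
      pvLoopA ls true test (PySem.Str.join "" buf) = pvGroup test buf (pvSection ls) := by
  intro ls
  induction ls with
  | nil => intro test buf; simp [pvLoopA, pvSection, pvGroup]
  | cons l ls ih =>
    intro test buf
    simp only [pvLoopA, pvSection, Bool.not_true, Bool.false_and, Bool.false_eq_true,
      if_false, if_true]
    by_cases hs : PySem.Str.isIn pvSent l = true
    · rw [if_pos hs, if_pos hs]
      simp [pvGroup]
    · rw [if_neg hs, if_neg hs]
      by_cases hsemi : PySem.Str.isIn ";" l = true
      · rw [hsemi]
        simp only [pvGroup, hsemi, Bool.not_true, Bool.false_eq_true, if_false, if_true,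
          ← pvJoin_snoc]
        have h2 := ih (test ++ [PySem.Str.strip (PySem.Str.stripChars
          (PySem.Str.join "" (buf ++ [PySem.Str.strip l])) " ")]) []
        rw [pvJoin_nil] at h2
        exact h2
      · rw [Bool.not_eq_true] at hsemi
        rw [hsemi]
        simp only [pvGroup, hsemi, Bool.not_false, Bool.false_eq_true, if_false, if_true,
          ← pvJoin_snoc]
        exact ih test (buf ++ [PySem.Str.strip l])

-- A's seen=false phase equals B's boundary search.
lemma pvLoopA_false_eq_alt :
    ∀ (ls : List String), pvLoopA ls false [] "" = get_test_section_alt ls := by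
  intro ls
  induction ls with
  | nil => simp [pvLoopA, get_test_section_alt, pvFindStart]
  | cons l ls ih =>
    by_cases ht : PySem.Str.isIn "@Test" l = true
    · simp only [pvLoopA, ht, Bool.not_false, Bool.true_and, if_true, get_test_section_alt,
        pvFindStart, List.drop_succ_cons, List.drop_zero]
      have h2 := pvLoopA_true_eq_group ls [] []
      rw [pvJoin_nil] at h2
      exact h2
    · simp only [pvLoopA, ht, Bool.false_eq_true, if_false, Bool.not_false, Bool.true_and, ih,
        get_test_section_alt, pvFindStart]
      cases h : pvFindStart ls with
      | none => simp
      | some k => simp [List.drop_succ_cons]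

-- ===== VERDICT (by name: the statement is the Claim_ definition above) =====
theorem get_test_section_spec : Claim_equal_get_test_section := by
  intro lines _
  unfold Spec_get_test_section get_test_section
  exact pvLoopA_false_eq_alt lines
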